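-- pv_equiv track=rewrite | github.com/lizuoyue/Realtime-MPPE | Vis.py | generate_comb
-- ===== SOURCE A (Python) =====
-- def generate_comb(n, m):
-- 	assert(n >= m)
-- 	res = []
-- 	if m == 0:
-- 		res = [[0] * n]
-- 	else:
-- 		if n - 1 >= m:
-- 			res.extend([[0] + item for item in generate_comb(n - 1, m)])
-- 		res.extend([[1] + item for item in generate_comb(n - 1, m - 1)])
-- 	return res
-- ===== SOURCE B (Python) =====
-- def generate_comb(n, m):
--     assert n >= m
--     # bottom-up DP over suffix length k: row[j] = all length-k 0/1 vectors with j ones,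
--     # in the same lexicographic order as A, each subproblem computed exactly once
--     row = {0: [[]]}
--     for k in range(1, n + 1):
--         new = {}
--         for j in range(0, min(k, m) + 1):
--             new[j] = [[0] + v for v in row.get(j, [])] + [[1] + v for v in row.get(j - 1, [])]
--         row = new
--     return row.get(m, [])
-- ===== Notes on version B (the rewrite author's own statement) =====
-- stated objective: alternative
-- what changed: Replaced A's naive top-down double recursion (which recomputes each shared subproblem (k,j) many times) by a bottom-up memoized DP: one row dictionary per suffix length k, each subproblem built exactly once, same lexicographic output order.
import Mathlib
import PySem

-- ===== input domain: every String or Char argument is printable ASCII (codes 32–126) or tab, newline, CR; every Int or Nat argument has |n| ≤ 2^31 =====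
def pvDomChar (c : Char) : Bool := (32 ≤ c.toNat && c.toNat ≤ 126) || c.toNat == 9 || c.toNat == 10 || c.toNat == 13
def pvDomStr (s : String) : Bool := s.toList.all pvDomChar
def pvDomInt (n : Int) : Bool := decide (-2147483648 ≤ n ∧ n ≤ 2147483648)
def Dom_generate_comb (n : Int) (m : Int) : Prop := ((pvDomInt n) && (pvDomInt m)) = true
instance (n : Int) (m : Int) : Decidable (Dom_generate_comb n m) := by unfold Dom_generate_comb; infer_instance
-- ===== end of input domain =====

-- B replaces A's naive top-down double recursion by a bottom-up memoized DP over suffix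
-- lengths (each subproblem built once); objective: alternative algorithm, same output.

-- ===== PORT A =====
-- A's recursion, on n.toNat (A asserts n >= m, so inside Pre_ we have n ≥ 0 and toNat is exact).
-- At k = 0 with m ≠ 0 the Python raises (failed assert / infinite descent in the recursive
-- call) — unreachable from any input satisfying Pre_; the port returns [] there.
def pvGoA : Nat → Int → List (List Int)
  | 0, m => if m = 0 then [[]] else []
  | k+1, m =>
      if m = 0 then [List.replicate (k+1) (0 : Int)]
      else (if (k : Int) ≥ m then (pvGoA k m).map (fun v => (0 : Int) :: v) else []) ++
           (pvGoA k (m - 1)).map (fun v => (1 : Int) :: v)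

def generate_comb (n : Int) (m : Int) : List (List Int) := pvGoA n.toNat m

-- ===== PORT B =====
def generate_comb_alt (n : Int) (m : Int) : List (List Int) :=
  let row := (PySem.List.pyRange 1 (n + 1) 1).foldl
    (fun row k =>
      (PySem.List.pyRange 0 (min k m + 1) 1).foldl
        (fun new j =>
          new.insert j (((row.getD j []).map (fun v => (0 : Int) :: v)) ++
                        ((row.getD (j - 1) []).map (fun v => (1 : Int) :: v))))
        PySem.Dict.empty)
    (PySem.Dict.empty.insert 0 [[]])
  row.getD m []

-- ===== PRECONDITION & SPEC =====
-- Pre_: A's assert requires n ≥ m, and for m < 0 A recurses forever (RecursionError);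
-- A returns normally exactly when 0 ≤ m ≤ n.
def Pre_generate_comb (n : Int) (m : Int) : Prop := 0 ≤ m ∧ m ≤ n
instance (n : Int) (m : Int) : Decidable (Pre_generate_comb n m) := by
  unfold Pre_generate_comb; infer_instance
def pvWitness_generate_comb : Int × Int := (3, 2)

def Spec_generate_comb (n : Int) (m : Int) (out : List (List Int)) : Prop := out = generate_comb_alt n m
instance (n : Int) (m : Int) (out : List (List Int)) : Decidable (Spec_generate_comb n m out) := by unfold Spec_generate_comb; infer_instance

-- ===== CLAIM (what is proved, stated in full; the proofs are below) =====
def Claim_equal_generate_comb : Prop := ∀ (n : Int) (m : Int), Dom_generate_comb n m → Pre_generate_comb n m → Spec_generate_comb n m (generate_comb n m)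

-- ===== LEMMAS AND PROOFS =====

-- A fold of inserts whose values do not depend on the accumulator: lookup is by membership.
lemma pv_foldl_insert_getD {ν : Type} (L : List Int) (g : Int → ν) (d0 : PySem.Dict Int ν)
    (x : Int) (dflt : ν) :
    ((L.foldl (fun d j => d.insert j (g j)) d0).getD x dflt) =
      if x ∈ L then g x else d0.getD x dflt := by
  induction L generalizing d0 with
  | nil => simp
  | cons a L ih =>
    simp only [List.foldl_cons, ih]
    by_cases hx : x ∈ L
    · simp [hx]
    · by_cases hxa : x = a
      · subst hxa; simp [hx, PySem.Dict.getD_insert_self]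
      · simp [hx, hxa, PySem.Dict.getD_insert_of_ne _ _ _ hxa]

-- The row after processing suffix lengths 1..N holds exactly A's subproblems pvGoA N j.
lemma pv_row_invariant (m : Int) (hm : 0 ≤ m) (N : Nat) (x : Int) :
    (((PySem.List.pyRange 1 ((N : Int) + 1) 1).foldl
      (fun row k =>
        (PySem.List.pyRange 0 (min k m + 1) 1).foldl
          (fun new j =>
            new.insert j (((row.getD j []).map (fun v => (0 : Int) :: v)) ++
                          ((row.getD (j - 1) []).map (fun v => (1 : Int) :: v))))
          PySem.Dict.empty)
      (PySem.Dict.empty.insert 0 [[]])).getD x []) =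
      if 0 ≤ x ∧ x ≤ min (N : Int) m then pvGoA N x else [] := by
  induction N generalizing x with
  | zero =>
    rw [show ((0 : Nat) : Int) + 1 = 1 by norm_num, PySem.List.pyRange_one_eq_nil (le_refl 1)]
    simp only [List.foldl_nil]
    by_cases hx : x = 0
    · subst hx; simp [PySem.Dict.getD_insert_self, pvGoA, hm]
    · rw [PySem.Dict.getD_insert_of_ne _ _ _ hx]
      have : ¬ (0 ≤ x ∧ x ≤ min ((0 : Nat) : Int) m) := by
        push_cast; intro ⟨h1, h2⟩; omega
      rw [if_neg this]
      simp
  | succ N ih =>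
    have hsplit : PySem.List.pyRange 1 ((N + 1 : Nat) : Int) 1 ++ [((N + 1 : Nat) : Int)] =
        PySem.List.pyRange 1 (((N + 1 : Nat) : Int) + 1) 1 := by
      rw [PySem.List.pyRange_one_succ_right (by push_cast; omega)]
    rw [← hsplit, List.foldl_append, List.foldl_cons, List.foldl_nil]
    rw [show ((N + 1 : Nat) : Int) = ((N : Int) + 1) by push_cast; ring]
    rw [pv_foldl_insert_getD]
    by_cases hx : x ∈ PySem.List.pyRange 0 (min ((N : Int) + 1) m + 1) 1
    · rw [if_pos hx]
      rw [PySem.List.mem_pyRange_one] at hx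
      obtain ⟨hx0, hxlt⟩ := hx
      have hxle : x ≤ min ((N : Int) + 1) m := by omega
      have hcond : 0 ≤ x ∧ x ≤ min (((N : Nat) : Int) + 1) m := ⟨hx0, by omega⟩
      rw [if_pos hcond]
      rw [ih x, ih (x - 1)]
      by_cases hx0' : x = 0
      · subst hx0'
        have h1 : (0 : Int) ≤ 0 ∧ (0 : Int) ≤ min ((N : Nat) : Int) m := by
          exact ⟨by omega, by omega⟩
        have h2 : ¬ ((0 : Int) ≤ 0 - 1 ∧ (0 : Int) - 1 ≤ min ((N : Nat) : Int) m) := by omega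
        rw [if_pos h1, if_neg h2]
        have hN0 : pvGoA N 0 = [List.replicate N (0 : Int)] := by
          cases N with
          | zero => simp [pvGoA]
          | succ N' => simp [pvGoA]
        have hN1 : pvGoA (N + 1) 0 = [List.replicate (N + 1) (0 : Int)] := by simp [pvGoA]
        simp [hN0, hN1, List.replicate_succ]
      · -- 1 ≤ x
        have hx1 : 1 ≤ x := by omega
        have hxm : x ≤ m := by omega
        have hxN1 : x ≤ (N : Int) + 1 := by omega
        have hgoal : pvGoA (N + 1) x =
            (if (N : Int) ≥ x then (pvGoA N x).map (fun v => (0 : Int) :: v) else []) ++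
            (pvGoA N (x - 1)).map (fun v => (1 : Int) :: v) := by
          simp [pvGoA, hx0']
        rw [hgoal]
        have h2 : (0 : Int) ≤ x - 1 ∧ x - 1 ≤ min ((N : Nat) : Int) m := by
          exact ⟨by omega, by omega⟩
        rw [if_pos h2]
        by_cases hxN : x ≤ (N : Int)
        · have h1 : (0 : Int) ≤ x ∧ x ≤ min ((N : Nat) : Int) m := by
            exact ⟨by omega, by omega⟩
          rw [if_pos h1, if_pos (by omega : (N : Int) ≥ x)]
        · have h1 : ¬ ((0 : Int) ≤ x ∧ x ≤ min ((N : Nat) : Int) m) := by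
            omega
          rw [if_neg h1, if_neg (by omega : ¬ (N : Int) ≥ x)]
          simp
    · rw [if_neg hx]
      rw [PySem.List.mem_pyRange_one] at hx
      push Not at hx
      have : ¬ (0 ≤ x ∧ x ≤ min (((N : Nat) : Int) + 1) m) := by
        intro ⟨h1, h2⟩
        exact absurd h2 (by have := hx h1; omega)
      rw [if_neg this]
      simp

-- ===== VERDICT (by name: the statement is the Claim_ definition above) =====
theorem generate_comb_spec : Claim_equal_generate_comb := by
  intro n m _ hpre
  obtain ⟨hm, hmn⟩ := hpre
  have hn : 0 ≤ n := le_trans hm hmn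
  unfold Spec_generate_comb generate_comb generate_comb_alt
  have hcast : ((n.toNat : Int)) = n := Int.toNat_of_nonneg hn
  have := pv_row_invariant m hm n.toNat m
  rw [hcast] at this
  rw [this]
  rw [if_pos ⟨hm, by omega⟩]
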